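-- pv_equiv track=rewrite | github.com/tiagoaoa/ribault-release | scripts/dyck/gen_dyck_input.py | compute_leaves
-- ===== SOURCE A (Python) =====
-- import argparse, os, math
--
-- def compute_leaves(totalLen, P, IMB):
--     """Compute P leaf intervals by splitting with IMB at each level.
--     Guarantees every leaf has count >= 1 (steals from largest if needed)."""
--     if P <= 1:
--         return [(0, totalLen)]
--     depth = int(math.ceil(math.log2(P)))
--     # Each entry: (start, count)
--     nodes = [(0, totalLen)]
--     for _ in range(depth):
--         new_nodes = []
--         for (start, count) in nodes:
--             if count <= 1:
--                 new_nodes.append((start, count))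
--                 new_nodes.append((start + count, 0))
--             else:
--                 kRaw = (count * (100 + IMB)) // 200
--                 k = max(1, min(count - 1, kRaw))
--                 new_nodes.append((start, k))
--                 new_nodes.append((start + k, count - k))
--         nodes = new_nodes
--     leaves = nodes[:P]
--     # Ensure every leaf has count >= 1: steal from the largest leaf
--     counts = [c for _, c in leaves]
--     zeros = [i for i, c in enumerate(counts) if c == 0]
--     if zeros:
--         biggest = max(range(len(counts)), key=lambda i: counts[i])
--         for zi in zeros:
--             counts[biggest] -= 1
--             counts[zi] = 1
--         # Recompute starts from counts
--         new_leaves = []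
--         pos = 0
--         for c in counts:
--             new_leaves.append((pos, c))
--             pos += c
--         leaves = new_leaves
--     return leaves
-- ===== SOURCE B (Python) =====
-- import math
--
-- def _split(start, count, d, IMB):
--     """Recursive divide-and-conquer: leaves of the depth-d split tree, left to right."""
--     if d == 0:
--         return [(start, count)]
--     if count <= 1:
--         k = count
--     else:
--         kRaw = (count * (100 + IMB)) // 200
--         k = max(1, min(count - 1, kRaw))
--     return _split(start, k, d - 1, IMB) + _split(start + k, count - k, d - 1, IMB)
--
-- def _fixup(leaves):
--     counts = [c for _, c in leaves]
--     zeros = [i for i, c in enumerate(counts) if c == 0]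
--     if not zeros:
--         return leaves
--     biggest = max(range(len(counts)), key=lambda i: counts[i])
--     for zi in zeros:
--         counts[biggest] -= 1
--         counts[zi] = 1
--     out = []
--     pos = 0
--     for c in counts:
--         out.append((pos, c))
--         pos += c
--     return out
--
-- def compute_leaves(totalLen, P, IMB):
--     if P <= 1:
--         return [(0, totalLen)]
--     depth = int(math.ceil(math.log2(P)))
--     return _fixup(_split(0, totalLen, depth, IMB)[:P])
-- ===== Notes on version B (the rewrite author's own statement) =====
-- stated objective: alternative
-- what changed: Replaces A's level-by-level BFS doubling loop over a nodes list with a recursive divide-and-conquer splitter _split(start,count,d) producing the same preorder leaf list; truncation and the steal fixup are kept.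
import Mathlib
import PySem

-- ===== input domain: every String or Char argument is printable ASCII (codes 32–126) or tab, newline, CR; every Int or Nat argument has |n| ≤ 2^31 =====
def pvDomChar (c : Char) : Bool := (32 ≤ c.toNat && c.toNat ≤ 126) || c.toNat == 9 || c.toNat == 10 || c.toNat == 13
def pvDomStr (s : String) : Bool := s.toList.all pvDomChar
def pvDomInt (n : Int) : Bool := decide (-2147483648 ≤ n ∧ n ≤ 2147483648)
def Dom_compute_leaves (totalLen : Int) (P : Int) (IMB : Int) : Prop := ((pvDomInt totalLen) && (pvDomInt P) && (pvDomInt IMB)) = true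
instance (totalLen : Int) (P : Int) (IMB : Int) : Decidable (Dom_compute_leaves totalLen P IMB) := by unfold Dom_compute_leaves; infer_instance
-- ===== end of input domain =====

-- B replaces A's level-by-level BFS doubling loop with a recursive divide-and-conquer
-- splitter over the same recurrence (objective: alternative decomposition, same cost).

-- Shared steal-fixup (identical Python code in A and in B's `_fixup` helper):
-- counts, zero indices, first-maximal index, the steal loop, and the prefix-sum rebuild.
-- All list indices used here are nonnegative and in range by construction.
def pvFixup (leaves : List (Int × Int)) : List (Int × Int) :=
  let counts := leaves.map (fun sc => sc.2)
  let zeros := ((PySem.List.enumerate counts 0).filter (fun ic => ic.2 == 0)).map (fun ic => ic.1)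
  if zeros = [] then leaves
  else
    -- max(range(len(counts)), key=λ i. counts[i]) : first index attaining the maximum
    let biggest := (PySem.List.pyRange 0 (counts.length) 1).foldl
      (fun best i => if PySem.List.pyGetD counts best 0 < PySem.List.pyGetD counts i 0 then i else best) 0
    let counts2 := zeros.foldl (fun cs zi =>
      let cs := PySem.List.pySetD cs biggest (PySem.List.pyGetD cs biggest 0 - 1)
      PySem.List.pySetD cs zi 1) counts
    (counts2.foldl (fun (acc : List (Int × Int) × Int) c => (acc.1 ++ [(acc.2, c)], acc.2 + c)) ([], 0)).1

-- ===== PORT A =====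
-- one body iteration of A's inner loop: the two children of node (start, count)
def pvStep (IMB : Int) (sc : Int × Int) : List (Int × Int) :=
  if sc.2 ≤ 1 then [(sc.1, sc.2), (sc.1 + sc.2, 0)]
  else
    let kRaw := PySem.Int.floordiv (sc.2 * (100 + IMB)) 200
    let k := max 1 (min (sc.2 - 1) kRaw)
    [(sc.1, k), (sc.1 + k, sc.2 - k)]

def compute_leaves (totalLen : Int) (P : Int) (IMB : Int) : List (Int × Int) :=
  if P ≤ 1 then [(0, totalLen)]
  else
    -- int(math.ceil(math.log2(P))) = Nat.clog 2 P for 2 ≤ P ≤ 2^31 (double log2 is exact enough there)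
    let depth := Nat.clog 2 P.toNat
    let nodes := (List.range depth).foldl
      (fun nodes _ => nodes.foldl (fun newNodes sc => newNodes ++ pvStep IMB sc) []) [(0, totalLen)]
    let leaves := PySem.List.slice nodes none (some P)   -- nodes[:P]
    pvFixup leaves

-- ===== PORT B =====
def pvSplit (IMB : Int) (start count : Int) : Nat → List (Int × Int)
  | 0 => [(start, count)]
  | d + 1 =>
    let k := if count ≤ 1 then count
             else max 1 (min (count - 1) (PySem.Int.floordiv (count * (100 + IMB)) 200))
    pvSplit IMB start k d ++ pvSplit IMB (start + k) (count - k) d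

def compute_leaves_alt (totalLen : Int) (P : Int) (IMB : Int) : List (Int × Int) :=
  if P ≤ 1 then [(0, totalLen)]
  else
    let depth := Nat.clog 2 P.toNat   -- same int(math.ceil(math.log2(P))) line as A
    pvFixup (PySem.List.slice (pvSplit IMB 0 totalLen depth) none (some P))

-- ===== PRECONDITION & SPEC =====
def Spec_compute_leaves (totalLen : Int) (P : Int) (IMB : Int) (out : List (Int × Int)) : Prop := out = compute_leaves_alt totalLen P IMB
instance (totalLen : Int) (P : Int) (IMB : Int) (out : List (Int × Int)) : Decidable (Spec_compute_leaves totalLen P IMB out) := by unfold Spec_compute_leaves; infer_instance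

-- ===== CLAIM (what is proved, stated in full; the proofs are below) =====
def Claim_equal_compute_leaves : Prop := ∀ (totalLen : Int) (P : Int) (IMB : Int), Dom_compute_leaves totalLen P IMB → Spec_compute_leaves totalLen P IMB (compute_leaves totalLen P IMB)

-- ===== LEMMAS AND PROOFS =====

-- one recursion level of B equals one node expansion of A
theorem pvSplit_one (IMB s c : Int) : pvSplit IMB s c 1 = pvStep IMB (s, c) := by
  by_cases h : c ≤ 1 <;> simp [pvSplit, pvStep, h]

-- peeling a level off the BOTTOM of B's recursion
theorem pvSplit_succ (IMB : Int) (d : Nat) : ∀ (s c : Int),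
    pvSplit IMB s c (d + 1) = (pvSplit IMB s c d).flatMap (pvStep IMB) := by
  induction d with
  | zero => intro s c; simpa [pvSplit] using pvSplit_one IMB s c
  | succ d ih =>
    intro s c
    show pvSplit IMB s _ (d + 1) ++ pvSplit IMB (s + _) _ (d + 1) = _
    rw [ih, ih, ← List.flatMap_append]
    rfl

-- A's level-by-level loop computes exactly B's recursive split, node by node
theorem pvIter_eq (IMB : Int) (d : Nat) : ∀ (L : List (Int × Int)),
    (List.range d).foldl
      (fun nodes _ => nodes.foldl (fun newNodes sc => newNodes ++ pvStep IMB sc) []) L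
    = L.flatMap (fun sc => pvSplit IMB sc.1 sc.2 d) := by
  induction d with
  | zero => intro L; simp [pvSplit]
  | succ d ih =>
    intro L
    rw [List.range_succ, List.foldl_append, ih]
    simp only [List.foldl]
    rw [PySem.List.foldl_append_eq_flatMap]
    simp only [List.nil_append, List.flatMap_assoc]
    congr 1
    funext sc
    rw [← pvSplit_succ]

-- ===== VERDICT (by name: the statement is the Claim_ definition above) =====
theorem compute_leaves_spec : Claim_equal_compute_leaves := by
  intro totalLen P IMB _
  unfold Spec_compute_leaves compute_leaves compute_leaves_alt
  by_cases h : P ≤ 1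
  · simp [h]
  · simp only [if_neg h]
    rw [pvIter_eq]
    simp
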